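-- pv_equiv track=rewrite | github.com/AdamOtto/Daily-Challenges | Challenge184.py | Solution
-- ===== SOURCE A (Python) =====
-- def Solution(in1):
--     d = {}
--
--     for i in range(0, len(in1)):
--         d[in1[i]] = 0
--         for j in range(0, len(in1)):
--             if in1[j] % in1[i] == 0:
--                 d[in1[i]] += 1
--     retVal = None
--     count = None
--     for key, val in d.items():
--         if retVal is None or count < val:
--             count = val
--             retVal = key
--     return retVal
-- ===== SOURCE B (Python) =====
-- def Solution(in1):
--     # Inverted direction: instead of scanning the whole array once per candidate,
--     # each element credits every one of its divisors that occurs in the input,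
--     # found by trial division up to sqrt(|v|): O(n*sqrt(V)) instead of O(n^2).
--     cnt = {}
--     for v in in1:
--         if v not in cnt:
--             cnt[v] = 0
--     for v in in1:
--         a = -v if v < 0 else v
--         d = 1
--         while d * d <= a:
--             if a % d == 0:
--                 q = a // d
--                 if d in cnt:
--                     cnt[d] += 1
--                 if -d in cnt:
--                     cnt[-d] += 1
--                 if q != d:
--                     if q in cnt:
--                         cnt[q] += 1
--                     if -q in cnt:
--                         cnt[-q] += 1
--             d += 1
--     best_key = None
--     best = -1
--     for x, c in cnt.items():
--         if c > best:
--             best = c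
--             best_key = x
--     return best_key
-- ===== Notes on version B (the rewrite author's own statement) =====
-- stated objective: faster
-- what changed: A counts, for every candidate x, how many array elements x divides by rescanning the whole array (nested loops); B inverts the direction: it builds the key dict once, then each element credits all of its divisors that occur as keys, found by trial division up to sqrt(|v|), and finally scans for the first maximal count.
-- outside the precondition, e.g. on Solution([]): A returns None, B returns None
import Mathlib
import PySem

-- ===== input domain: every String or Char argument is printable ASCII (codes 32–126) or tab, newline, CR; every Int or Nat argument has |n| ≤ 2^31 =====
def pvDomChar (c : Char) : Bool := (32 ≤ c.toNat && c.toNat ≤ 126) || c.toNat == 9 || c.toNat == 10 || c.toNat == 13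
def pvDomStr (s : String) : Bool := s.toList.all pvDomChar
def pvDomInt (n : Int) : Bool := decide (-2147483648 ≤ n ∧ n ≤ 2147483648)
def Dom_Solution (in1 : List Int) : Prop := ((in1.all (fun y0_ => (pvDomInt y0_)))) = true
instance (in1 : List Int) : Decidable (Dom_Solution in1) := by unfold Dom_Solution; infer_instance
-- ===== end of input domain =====

-- B replaces A's per-candidate scan of the whole array by the inverse pass: each element
-- credits its divisors, found by trial division up to sqrt(|v|) — a different algorithm.
-- ===== PORT A =====
def Solution (in1 : List Int) : Int :=
  let d : PySem.Dict Int Int :=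
    (PySem.List.pyRange 0 (PySem.List.len in1) 1).foldl (fun d i =>
      let x := PySem.List.pyGetD in1 i 0   -- i from range(0, len(in1)) is always in range
      let d := d.insert x 0
      (PySem.List.pyRange 0 (PySem.List.len in1) 1).foldl (fun d j =>
        let y := PySem.List.pyGetD in1 j 0
        if PySem.Int.mod y x == 0 then d.modify x 0 (· + 1) else d) d) PySem.Dict.empty
  -- retVal/count loop; count (p.2) is 'some' whenever retVal (p.1) is, so the 'p.2.getD 0'
  -- in the 'some' branch is never the Python comparison against None
  let p := d.items.foldl (fun (p : Option Int × Option Int) kv =>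
      match p.1 with
      | none => (some kv.1, some kv.2)
      | some _ => if p.2.getD 0 < kv.2 then (some kv.1, some kv.2) else p)
      ((none : Option Int), (none : Option Int))
  p.1.getD 0   -- Pre_ (in1 ≠ []) guarantees retVal is not None

-- ===== PORT B =====
-- 'if t in cnt: cnt[t] += 1'
def pyCredit (c : PySem.Dict Int Int) (t : Int) : PySem.Dict Int Int :=
  if c.contains t then c.modify t 0 (· + 1) else c

-- the 'while d * d <= a: … d += 1' loop of B; fuel = a.toNat + 1 at the call site is
-- enough for every iteration (d*d ≤ a forces d ≤ a), so the fuel-0 case is never reached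
def creditLoop : Nat → PySem.Dict Int Int → Int → Int → PySem.Dict Int Int
  | 0, c, _, _ => c
  | Nat.succ fuel, c, a, d =>
    if d * d ≤ a then
      let c' :=
        if PySem.Int.mod a d == 0 then
          let q := PySem.Int.floordiv a d
          let c1 := pyCredit (pyCredit c d) (-d)
          if q != d then pyCredit (pyCredit c1 q) (-q) else c1
        else c
      creditLoop fuel c' a (d + 1)
    else c

def Solution_alt (in1 : List Int) : Int :=
  let cnt := in1.foldl (fun c v => if c.contains v then c else c.insert v 0)
      (PySem.Dict.empty : PySem.Dict Int Int)
  let cnt := in1.foldl (fun c v =>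
      let a := if v < 0 then -v else v
      creditLoop (a.toNat + 1) c a 1) cnt
  let p := cnt.items.foldl (fun (p : Option Int × Int) kv =>
      if kv.2 > p.2 then (some kv.1, kv.2) else p) ((none : Option Int), (-1 : Int))
  p.1.getD 0

-- ===== PRECONDITION & SPEC =====
-- Pre_ excludes the empty list (A returns None, not an int) and lists containing 0
-- (A raises ZeroDivisionError on 'in1[j] % 0').
def Pre_Solution (in1 : List Int) : Prop := in1 ≠ [] ∧ (0 : Int) ∉ in1
instance (in1 : List Int) : Decidable (Pre_Solution in1) := by unfold Pre_Solution; infer_instance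
def pvWitness_Solution : List Int := [2, 4, 3]

def Spec_Solution (in1 : List Int) (out : Int) : Prop := out = Solution_alt in1
instance (in1 : List Int) (out : Int) : Decidable (Spec_Solution in1 out) := by unfold Spec_Solution; infer_instance

-- ===== CLAIM (what is proved, stated in full; the proofs are below) =====
def Claim_equal_Solution : Prop := ∀ (in1 : List Int), Dom_Solution in1 → Pre_Solution in1 → Spec_Solution in1 (Solution in1)

-- ===== LEMMAS AND PROOFS =====

-- ---- A-side: the inner counting loop ----
def innerA (l : List Int) (x : Int) (c : PySem.Dict Int Int) : PySem.Dict Int Int :=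
  l.foldl (fun d y => if PySem.Int.mod y x == 0 then d.modify x 0 (· + 1) else d) c

def outerA (l p : List Int) : PySem.Dict Int Int :=
  p.foldl (fun d v => innerA l v (d.insert v 0)) PySem.Dict.empty

theorem innerA_getD_self (l : List Int) (x : Int) (c : PySem.Dict Int Int) :
    (innerA l x c).getD x 0 = c.getD x 0 + (l.countP (fun y => PySem.Int.mod y x == 0) : Int) := by
  induction l generalizing c with
  | nil => simp [innerA]
  | cons y t ih =>
    simp only [innerA, List.foldl_cons, List.countP_cons] at *
    by_cases h : (PySem.Int.mod y x == 0) = true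
    · simp only [h, if_true, ih, PySem.Dict.getD_modify_self]
      push_cast; ring
    · rw [if_neg h, ih]
      simp [h]

theorem innerA_getD_ne (l : List Int) (x x' : Int) (hne : x' ≠ x) (c : PySem.Dict Int Int) :
    (innerA l x c).getD x' 0 = c.getD x' 0 := by
  induction l generalizing c with
  | nil => simp [innerA]
  | cons y t ih =>
    simp only [innerA, List.foldl_cons] at *
    by_cases h : (PySem.Int.mod y x == 0) = true
    · rw [if_pos h, ih, PySem.Dict.getD_modify_of_ne _ _ _ hne]
    · rw [if_neg h, ih]

theorem innerA_keys (l : List Int) (x : Int) (c : PySem.Dict Int Int)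
    (hc : c.contains x = true) : (innerA l x c).keys = c.keys := by
  induction l generalizing c with
  | nil => simp [innerA]
  | cons y t ih =>
    simp only [innerA, List.foldl_cons] at *
    by_cases h : (PySem.Int.mod y x == 0) = true
    · rw [if_pos h, ih _ (by simp [PySem.Dict.contains_modify, hc])]
      rw [PySem.Dict.keys_modify, PySem.Dict.keys_insert_of_contains _ _ hc]
    · rw [if_neg h, ih _ hc]

theorem outerA_spec (l : List Int) (p : List Int) :
    (outerA l p).keys = PySem.List.dedup p ∧
    ∀ x ∈ PySem.List.dedup p, (outerA l p).getD x 0 =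
      (l.countP (fun y => PySem.Int.mod y x == 0) : Int) := by
  induction p using List.reverseRecOn with
  | nil => simp [outerA, PySem.List.dedup_eq_ofList, PySem.Set.ofList_nil]
  | append_singleton p v ih =>
    obtain ⟨hk, hv⟩ := ih
    have hstep : outerA l (p ++ [v]) = innerA l v ((outerA l p).insert v 0) := by
      simp [outerA, List.foldl_append]
    have hcont : ((outerA l p).insert v 0).contains v = true :=
      PySem.Dict.contains_insert_self _ _ _
    have hkeys : (outerA l (p ++ [v])).keys = PySem.List.dedup (p ++ [v]) := by
      rw [hstep, innerA_keys _ _ _ hcont]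
      rw [PySem.List.dedup_eq_ofList, PySem.Set.ofList_append_singleton, PySem.Set.add_eq_ite]
      by_cases hm : v ∈ PySem.Set.ofList p
      · rw [if_pos hm, PySem.Dict.keys_insert_of_contains]
        · rw [hk, PySem.List.dedup_eq_ofList]
        · rw [PySem.Dict.contains_iff_mem_keys, hk, PySem.List.dedup_eq_ofList]; exact hm
      · rw [if_neg hm, PySem.Dict.keys_insert_of_not_contains]
        · rw [hk, PySem.List.dedup_eq_ofList]
        · rw [← Bool.not_eq_true, PySem.Dict.contains_iff_mem_keys, hk,
            PySem.List.dedup_eq_ofList]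
          exact hm
    refine ⟨hkeys, ?_⟩
    intro x hx
    by_cases hxv : x = v
    · subst hxv
      rw [hstep, innerA_getD_self, PySem.Dict.getD_insert_self]; ring
    · have hxp : x ∈ PySem.List.dedup p := by
        rw [PySem.List.mem_dedup] at hx ⊢
        rcases List.mem_append.1 hx with h | h
        · exact h
        · simp only [List.mem_singleton] at h; exact absurd h hxv
      rw [hstep, innerA_getD_ne _ _ _ hxv, PySem.Dict.getD_insert_of_ne _ _ _ hxv, hv x hxp]

-- ---- B-side: the init loop ----
def initB (p : List Int) : PySem.Dict Int Int :=
  p.foldl (fun c v => if c.contains v then c else c.insert v 0) PySem.Dict.empty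

theorem initB_spec (p : List Int) :
    (initB p).keys = PySem.List.dedup p ∧ ∀ x, (initB p).getD x 0 = 0 := by
  induction p using List.reverseRecOn with
  | nil =>
    refine ⟨by simp [initB, PySem.List.dedup_eq_ofList, PySem.Set.ofList_nil], ?_⟩
    intro x; simp [initB, PySem.Dict.getD_empty]
  | append_singleton p v ih =>
    obtain ⟨hk, hv⟩ := ih
    have hstep : initB (p ++ [v]) =
        if (initB p).contains v then initB p else (initB p).insert v 0 := by
      simp [initB, List.foldl_append]
    rw [PySem.List.dedup_eq_ofList, PySem.Set.ofList_append_singleton, PySem.Set.add_eq_ite,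
      ← PySem.List.dedup_eq_ofList]
    by_cases hm : v ∈ PySem.List.dedup p
    · have hc : (initB p).contains v = true := by
        rw [PySem.Dict.contains_iff_mem_keys, hk]; exact hm
      rw [hstep, hc, if_pos hm]
      simp only [if_true]
      exact ⟨hk, hv⟩
    · have hc : (initB p).contains v = false := by
        rw [← Bool.not_eq_true, PySem.Dict.contains_iff_mem_keys, hk]; exact hm
      rw [hstep, hc, if_neg hm]
      simp only [Bool.false_eq_true, if_false]
      refine ⟨by rw [PySem.Dict.keys_insert_of_not_contains _ _ hc, hk], ?_⟩
      intro x
      by_cases hxv : x = v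
      · subst hxv; rw [PySem.Dict.getD_insert_self]
      · rw [PySem.Dict.getD_insert_of_ne _ _ _ hxv, hv]

-- ---- B-side: pyCredit ----
theorem keys_pyCredit (c : PySem.Dict Int Int) (t : Int) : (pyCredit c t).keys = c.keys := by
  unfold pyCredit
  by_cases h : c.contains t = true
  · rw [if_pos h, PySem.Dict.keys_modify, PySem.Dict.keys_insert_of_contains _ _ h]
  · rw [if_neg h]

theorem contains_pyCredit (c : PySem.Dict Int Int) (t u : Int) :
    (pyCredit c t).contains u = c.contains u := by
  rw [PySem.Dict.contains_eq_decide_mem_keys, PySem.Dict.contains_eq_decide_mem_keys,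
    keys_pyCredit]

theorem getD_pyCredit (c : PySem.Dict Int Int) (t x : Int) :
    (pyCredit c t).getD x 0 = c.getD x 0 + (if c.contains x = true ∧ x = t then 1 else 0) := by
  unfold pyCredit
  by_cases h : c.contains t = true
  · rw [if_pos h, PySem.Dict.getD_modify]
    by_cases hx : x = t
    · subst hx; simp [h]
    · simp [hx]
  · rw [if_neg h]
    have : ¬ (c.contains x = true ∧ x = t) := by
      rintro ⟨hc, rfl⟩; exact h hc
    rw [if_neg this]; ring

-- ---- arithmetic: which iteration credits x ----
-- the unique iteration e at which key x is credited by the divisor loop for a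
def mIter (a x : Int) : Int := min ((x.natAbs : Int)) (a / (x.natAbs : Int))

theorem mIter_sq_le (a x : Int) (hx : x ≠ 0) (hdvd : x ∣ a) (hm : 1 ≤ mIter a x) :
    mIter a x * mIter a x ≤ a := by
  have hX : (1 : Int) ≤ (x.natAbs : Int) := by
    have := Int.natAbs_pos.2 hx; exact_mod_cast this
  have hXd : ((x.natAbs : Int)) ∣ a := Int.natAbs_dvd.2 hdvd
  have hmul : a / (x.natAbs : Int) * (x.natAbs : Int) = a := Int.ediv_mul_cancel hXd
  have h1 : mIter a x ≤ (x.natAbs : Int) := min_le_left _ _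
  have h2 : mIter a x ≤ a / (x.natAbs : Int) := min_le_right _ _
  nlinarith [h1, h2, hmul, hX, hm]

theorem mIter_dvd (a x : Int) (hx : x ≠ 0) (hdvd : x ∣ a) : mIter a x ∣ a := by
  have hXd : ((x.natAbs : Int)) ∣ a := Int.natAbs_dvd.2 hdvd
  have hmul : a / (x.natAbs : Int) * (x.natAbs : Int) = a := Int.ediv_mul_cancel hXd
  rcases le_total ((x.natAbs : Int)) (a / (x.natAbs : Int)) with h | h
  · rw [mIter, min_eq_left h]; exact hXd
  · rw [mIter, min_eq_right h]
    exact ⟨(x.natAbs : Int), by linarith [mul_comm (a / (x.natAbs : Int)) ((x.natAbs : Int))]⟩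

theorem hit_iff (a d x : Int) (h1 : 1 ≤ d) (h2 : d * d ≤ a) (h3 : d ∣ a) :
    (x = d ∨ x = -d ∨ (a / d ≠ d ∧ (x = a / d ∨ x = -(a / d)))) ↔
    (x ≠ 0 ∧ x ∣ a ∧ mIter a x = d) := by
  have hq : a / d * d = a := Int.ediv_mul_cancel h3
  have hdq : d ≤ a / d := by nlinarith
  constructor
  · rintro (he | he | ⟨hne, he | he⟩) <;> rw [he]
    · refine ⟨by omega, h3, ?_⟩
      have hd' : ((d.natAbs : Int)) = d := by omega
      rw [mIter, hd', min_eq_left hdq]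
    · refine ⟨by omega, (neg_dvd).2 h3, ?_⟩
      have hd' : (((-d).natAbs : Int)) = d := by
        have h := Int.natAbs_neg d; omega
      rw [mIter, hd', min_eq_left hdq]
    · have hq1 : 1 ≤ a / d := by omega
      have hqdvd : a / d ∣ a := ⟨d, by linarith [mul_comm (a / d) d]⟩
      refine ⟨by omega, hqdvd, ?_⟩
      have habs : (((a / d).natAbs : Int)) = a / d := by omega
      have hdd : a / (a / d) = d := by
        have hne0 : a / d ≠ 0 := by omega
        calc a / (a / d) = (a / d * d) / (a / d) := by rw [hq]
          _ = d := Int.mul_ediv_cancel_left d hne0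
      rw [mIter, habs, hdd, min_eq_right hdq]
    · have hq1 : 1 ≤ a / d := by omega
      have hqdvd : -(a / d) ∣ a := (neg_dvd).2 ⟨d, by linarith [mul_comm (a / d) d]⟩
      refine ⟨by omega, hqdvd, ?_⟩
      have habs : ((((-(a / d)).natAbs : Int))) = a / d := by
        have h := Int.natAbs_neg (a / d); omega
      have hdd : a / (a / d) = d := by
        have hne0 : a / d ≠ 0 := by omega
        calc a / (a / d) = (a / d * d) / (a / d) := by rw [hq]
          _ = d := Int.mul_ediv_cancel_left d hne0
      rw [mIter, habs, hdd, min_eq_right hdq]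
  · rintro ⟨hx0, hxdvd, hm⟩
    have hX : (1 : Int) ≤ (x.natAbs : Int) := by
      have := Int.natAbs_pos.2 hx0; exact_mod_cast this
    have hXd : ((x.natAbs : Int)) ∣ a := Int.natAbs_dvd.2 hxdvd
    have hmul : a / (x.natAbs : Int) * (x.natAbs : Int) = a := Int.ediv_mul_cancel hXd
    have hxcases : x = (x.natAbs : Int) ∨ x = -((x.natAbs : Int)) := Int.natAbs_eq x
    rcases le_or_gt ((x.natAbs : Int)) (a / (x.natAbs : Int)) with h | h
    · rw [mIter, min_eq_left h] at hm
      rcases hxcases with h' | h'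
      · left; omega
      · right; left; omega
    · rw [mIter, min_eq_right (le_of_lt h)] at hm
      right; right
      have hXq : a / d = (x.natAbs : Int) := by
        rw [← hm]
        have hne0 : a / (x.natAbs : Int) ≠ 0 := by omega
        calc a / (a / (x.natAbs : Int))
            = (a / (x.natAbs : Int) * (x.natAbs : Int)) / (a / (x.natAbs : Int)) := by rw [hmul]
          _ = (x.natAbs : Int) := Int.mul_ediv_cancel_left _ hne0
      refine ⟨by omega, ?_⟩
      rcases hxcases with h' | h'
      · left; omega
      · right; omega

-- ---- B-side: the divisor loop ----
theorem creditLoop_spec (fuel : Nat) : ∀ (c : PySem.Dict Int Int) (a d x : Int),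
    1 ≤ d → (a + 1 - d).toNat < fuel →
    (creditLoop fuel c a d).keys = c.keys ∧
    (creditLoop fuel c a d).getD x 0 = c.getD x 0 +
      (if c.contains x = true ∧ x ≠ 0 ∧ x ∣ a ∧ d ≤ mIter a x then 1 else 0) := by
  induction fuel with
  | zero => intro c a d x h1 h2; omega
  | succ fuel ih =>
    intro c a d x h1 h2
    by_cases hlt : d * d ≤ a
    · have hda : d ≤ a := by nlinarith
      simp only [creditLoop, if_pos hlt]
      set c' := (if PySem.Int.mod a d == 0 then
          (let q := PySem.Int.floordiv a d
           let c1 := pyCredit (pyCredit c d) (-d)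
           if q != d then pyCredit (pyCredit c1 q) (-q) else c1)
        else c) with hc'
      have hfuel : (a + 1 - (d + 1)).toNat < fuel := by omega
      obtain ⟨ihk, ihv⟩ := ih c' a (d + 1) x (by omega) hfuel
      by_cases hmod : (PySem.Int.mod a d == 0) = true
      · have hdvd : d ∣ a := (PySem.Int.mod_eq_zero_iff_dvd a d).1 (by simpa using hmod)
        have hfd : PySem.Int.floordiv a d = a / d := PySem.Int.floordiv_eq_ediv_of_pos (by omega)
        have hqmul : a / d * d = a := Int.ediv_mul_cancel hdvd
        have hdq : d ≤ a / d := by nlinarith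
        have hcontc' : ∀ u, c'.contains u = c.contains u := by
          intro u
          rw [hc']
          by_cases hqd : (PySem.Int.floordiv a d != d) = true
          · simp only [hmod, if_true, hqd, contains_pyCredit]
          · simp only [hmod, if_true, hqd, Bool.false_eq_true, if_false, contains_pyCredit]
        have hkeysc' : c'.keys = c.keys := by
          rw [hc']
          by_cases hqd : (PySem.Int.floordiv a d != d) = true
          · simp only [hmod, if_true, hqd, keys_pyCredit]
          · simp only [hmod, if_true, hqd, Bool.false_eq_true, if_false, keys_pyCredit]
        refine ⟨ihk.trans hkeysc', ?_⟩
        rw [ihv, hcontc' x]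
        -- value of c' at x
        have hgetc' : c'.getD x 0 = c.getD x 0 +
            (if c.contains x = true ∧
               (x = d ∨ x = -d ∨ (a / d ≠ d ∧ (x = a / d ∨ x = -(a / d)))) then 1 else 0) := by
          rw [hc']
          by_cases hqd : a / d = d
          · have hbne : (PySem.Int.floordiv a d != d) = false := by
              rw [hfd, hqd]; simp
            simp only [hmod, if_true, hbne, Bool.false_eq_true, if_false]
            rw [getD_pyCredit, getD_pyCredit, contains_pyCredit]
            by_cases hcx : c.contains x = true
            · simp only [hcx, true_and]
              have hdd : x = d → x ≠ -d := by omega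
              by_cases hxd : x = d
              · rw [if_pos hxd, if_neg (hdd hxd), if_pos (Or.inl hxd)]; ring
              · rw [if_neg hxd]
                by_cases hxnd : x = -d
                · rw [if_pos hxnd, if_pos (Or.inr (Or.inl hxnd))]; ring
                · rw [if_neg hxnd, if_neg (by rintro (h | h | ⟨h, -⟩) <;> first | exact hxd h | exact hxnd h | exact h hqd)]
                  ring
            · rw [Bool.not_eq_true] at hcx
              simp only [hcx, Bool.false_eq_true, false_and, if_false]
              ring
          · have hbne : (PySem.Int.floordiv a d != d) = true := by
              rw [hfd]; simpa using hqd
            simp only [hmod, if_true, hbne]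
            rw [hfd, getD_pyCredit, getD_pyCredit, getD_pyCredit, getD_pyCredit,
              contains_pyCredit, contains_pyCredit, contains_pyCredit, contains_pyCredit,
              contains_pyCredit, contains_pyCredit]
            by_cases hcx : c.contains x = true
            · simp only [hcx, true_and]
              have hq1 : 1 ≤ a / d := by omega
              by_cases e1 : x = d
              · rw [if_pos e1, if_neg (by omega), if_neg (by omega), if_neg (by omega),
                  if_pos (Or.inl e1)]
                ring
              · rw [if_neg e1]
                by_cases e2 : x = -d
                · rw [if_pos e2, if_neg (by omega), if_neg (by omega),
                    if_pos (Or.inr (Or.inl e2))]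
                  ring
                · rw [if_neg e2]
                  by_cases e3 : x = a / d
                  · rw [if_pos e3, if_neg (by omega),
                      if_pos (Or.inr (Or.inr ⟨hqd, Or.inl e3⟩))]
                    ring
                  · rw [if_neg e3]
                    by_cases e4 : x = -(a / d)
                    · rw [if_pos e4, if_pos (Or.inr (Or.inr ⟨hqd, Or.inr e4⟩))]; ring
                    · rw [if_neg e4, if_neg (by rintro (h | h | ⟨-, h | h⟩) <;>
                        first | exact e1 h | exact e2 h | exact e3 h | exact e4 h)]
                      ring
            · rw [Bool.not_eq_true] at hcx
              simp only [hcx, Bool.false_eq_true, false_and, if_false]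
              ring
        rw [hgetc']
        -- combine the two indicators
        by_cases hcx : c.contains x = true
        · simp only [hcx, true_and]
          by_cases hH : x ≠ 0 ∧ x ∣ a
          · have hiff := hit_iff a d x h1 hlt hdvd
            by_cases hmd : mIter a x = d
            · rcases hiff.2 ⟨hH.1, hH.2, hmd⟩ with hh
              rw [if_pos hh, if_neg (by rintro ⟨-, -, hle⟩; omega),
                if_pos ⟨hH.1, hH.2, by omega⟩]
              ring
            · rw [if_neg (fun hh => hmd (hiff.1 hh).2.2)]
              by_cases hle : d + 1 ≤ mIter a x
              · rw [if_pos ⟨hH.1, hH.2, hle⟩, if_pos ⟨hH.1, hH.2, by omega⟩]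
                ring
              · rw [if_neg (by rintro ⟨-, -, h⟩; exact hle h),
                  if_neg (by rintro ⟨-, -, h⟩; omega)]
                ring
          · have hnh : ¬ (x = d ∨ x = -d ∨ (a / d ≠ d ∧ (x = a / d ∨ x = -(a / d)))) := by
              intro hh
              obtain ⟨h0, hd, -⟩ := (hit_iff a d x h1 hlt hdvd).1 hh
              exact hH ⟨h0, hd⟩
            rw [if_neg hnh, if_neg (by rintro ⟨h0, hd, -⟩; exact hH ⟨h0, hd⟩),
              if_neg (by rintro ⟨h0, hd, -⟩; exact hH ⟨h0, hd⟩)]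
            ring
        · rw [Bool.not_eq_true] at hcx
          simp only [hcx, Bool.false_eq_true, false_and, if_false]
          ring
      · -- d does not divide a
        have hndvd : ¬ d ∣ a := fun hd =>
          hmod (by simpa using (PySem.Int.mod_eq_zero_iff_dvd a d).2 hd)
        have hceq : c' = c := by rw [hc', if_neg hmod]
        rw [hceq] at ihk ihv
        rw [hceq]
        refine ⟨ihk, ?_⟩
        rw [ihv]
        by_cases hcond : c.contains x = true ∧ x ≠ 0 ∧ x ∣ a
        · have hmd : mIter a x ≠ d := by
            intro h
            exact hndvd (h ▸ mIter_dvd a x hcond.2.1 hcond.2.2)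
          by_cases hle : d + 1 ≤ mIter a x
          · rw [if_pos ⟨hcond.1, hcond.2.1, hcond.2.2, hle⟩,
              if_pos ⟨hcond.1, hcond.2.1, hcond.2.2, by omega⟩]
          · rw [if_neg (by rintro ⟨-, -, -, h⟩; exact hle h),
              if_neg (by rintro ⟨-, -, -, h⟩; omega)]
        · rw [if_neg (by rintro ⟨h1', h2', h3', -⟩; exact hcond ⟨h1', h2', h3'⟩),
            if_neg (by rintro ⟨h1', h2', h3', -⟩; exact hcond ⟨h1', h2', h3'⟩)]
    · simp only [creditLoop, if_neg hlt]
      refine ⟨by trivial, ?_⟩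
      have hfalse : ¬ (c.contains x = true ∧ x ≠ 0 ∧ x ∣ a ∧ d ≤ mIter a x) := by
        rintro ⟨-, hx0, hxd, hdm⟩
        have := mIter_sq_le a x hx0 hxd (by omega)
        nlinarith
      rw [if_neg hfalse]; ring

-- ---- B-side: one element's crediting pass ----
theorem creditStep_spec (c : PySem.Dict Int Int) (v x : Int) (hv : v ≠ 0) :
    ((creditLoop ((if v < 0 then -v else v).toNat + 1) c (if v < 0 then -v else v) 1).keys = c.keys) ∧
    (creditLoop ((if v < 0 then -v else v).toNat + 1) c (if v < 0 then -v else v) 1).getD x 0 =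
      c.getD x 0 + (if c.contains x = true ∧ x ≠ 0 ∧ x ∣ v then 1 else 0) := by
  set a := if v < 0 then -v else v with ha
  have ha1 : 1 ≤ a := by rw [ha]; split <;> omega
  have hfuel : (a + 1 - 1).toNat < a.toNat + 1 := by omega
  obtain ⟨hk, hval⟩ := creditLoop_spec (a.toNat + 1) c a 1 x (le_refl 1) hfuel
  refine ⟨hk, ?_⟩
  rw [hval]
  have hdvd_iff : x ∣ a ↔ x ∣ v := by
    rw [ha]; split
    · exact dvd_neg
    · exact Iff.rfl
  have hcond : (c.contains x = true ∧ x ≠ 0 ∧ x ∣ a ∧ 1 ≤ mIter a x) ↔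
      (c.contains x = true ∧ x ≠ 0 ∧ x ∣ v) := by
    constructor
    · rintro ⟨hc, h0, hd, -⟩; exact ⟨hc, h0, hdvd_iff.1 hd⟩
    · rintro ⟨hc, h0, hd⟩
      have hda : x ∣ a := hdvd_iff.2 hd
      have hX : (1 : Int) ≤ (x.natAbs : Int) := by
        have := Int.natAbs_pos.2 h0; exact_mod_cast this
      have hXd : ((x.natAbs : Int)) ∣ a := Int.natAbs_dvd.2 hda
      have hmul : a / (x.natAbs : Int) * (x.natAbs : Int) = a := Int.ediv_mul_cancel hXd
      have hq1 : 1 ≤ a / (x.natAbs : Int) := by nlinarith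
      exact ⟨hc, h0, hda, le_min hX hq1⟩
  rw [if_congr hcond rfl rfl]

-- ---- B-side: the whole crediting fold ----
theorem creditFold_spec (p : List Int) : ∀ (c : PySem.Dict Int Int) (x : Int),
    (∀ v ∈ p, v ≠ 0) →
    ((p.foldl (fun c v =>
        let a := if v < 0 then -v else v
        creditLoop (a.toNat + 1) c a 1) c).keys = c.keys) ∧
    (p.foldl (fun c v =>
        let a := if v < 0 then -v else v
        creditLoop (a.toNat + 1) c a 1) c).getD x 0 =
      c.getD x 0 + (if c.contains x = true ∧ x ≠ 0 then (p.countP (fun v => decide (x ∣ v)) : Int) else 0) := by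
  induction p with
  | nil =>
    intro c x _
    refine ⟨rfl, ?_⟩
    simp
  | cons v t ih =>
    intro c x hvz
    have hv : v ≠ 0 := hvz v (List.mem_cons_self)
    obtain ⟨hk1, hval1⟩ := creditStep_spec c v x hv
    set c1 := creditLoop ((if v < 0 then -v else v).toNat + 1) c (if v < 0 then -v else v) 1 with hc1
    have hcont1 : c1.contains x = c.contains x := by
      rw [PySem.Dict.contains_eq_decide_mem_keys, PySem.Dict.contains_eq_decide_mem_keys, hk1]
    obtain ⟨hkt, hvt⟩ := ih c1 x (fun w hw => hvz w (List.mem_cons_of_mem _ hw))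
    simp only [List.foldl_cons]
    refine ⟨hkt.trans hk1, ?_⟩
    rw [hvt, hval1, hcont1, List.countP_cons]
    by_cases hc : c.contains x = true ∧ x ≠ 0
    · rw [if_pos hc, if_pos hc]
      by_cases hd : x ∣ v
      · rw [if_pos ⟨hc.1, hc.2, hd⟩]
        simp only [hd, decide_true]
        push_cast; ring
      · rw [if_neg (by rintro ⟨-, -, h⟩; exact hd h)]
        simp only [hd, decide_false]
        push_cast; ring
    · rw [if_neg hc, if_neg hc, if_neg (by rintro ⟨h1, h2, -⟩; exact hc ⟨h1, h2⟩)]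
      ring

-- ---- the two final max-scans agree ----
theorem scanA_tail (rest : List (Int × Int)) : ∀ (r c : Int),
    rest.foldl (fun (p : Option Int × Option Int) kv =>
      match p.1 with
      | none => (some kv.1, some kv.2)
      | some _ => if p.2.getD 0 < kv.2 then (some kv.1, some kv.2) else p) (some r, some c)
    = ((rest.foldl (fun (p : Option Int × Int) kv =>
        if kv.2 > p.2 then (some kv.1, kv.2) else p) (some r, c)).1,
       some ((rest.foldl (fun (p : Option Int × Int) kv =>
        if kv.2 > p.2 then (some kv.1, kv.2) else p) (some r, c)).2)) := by
  induction rest with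
  | nil => intro r c; rfl
  | cons kv t ih =>
    intro r c
    simp only [List.foldl_cons, Option.getD_some, gt_iff_lt]
    by_cases h : c < kv.2
    · rw [if_pos h, if_pos h]; exact ih kv.1 kv.2
    · rw [if_neg h, if_neg h]; exact ih r c

theorem scan_eq (k v : Int) (rest : List (Int × Int)) (hv : 0 ≤ v) :
    (((k, v) :: rest).foldl (fun (p : Option Int × Option Int) kv =>
      match p.1 with
      | none => (some kv.1, some kv.2)
      | some _ => if p.2.getD 0 < kv.2 then (some kv.1, some kv.2) else p)
      ((none : Option Int), (none : Option Int))).1.getD 0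
    = (((k, v) :: rest).foldl (fun (p : Option Int × Int) kv =>
        if kv.2 > p.2 then (some kv.1, kv.2) else p)
      ((none : Option Int), (-1 : Int))).1.getD 0 := by
  simp only [List.foldl_cons, gt_iff_lt]
  rw [if_pos (show (-1 : Int) < v by omega), scanA_tail]

-- ===== VERDICT =====
-- ---- both dicts have the same items list ----
theorem items_eq (in1 : List Int) (h0 : (0 : Int) ∉ in1) :
    (outerA in1 in1).items =
      (in1.foldl (fun c v =>
          let a := if v < 0 then -v else v
          creditLoop (a.toNat + 1) c a 1) (initB in1)).items := by
  obtain ⟨hkA, hvA⟩ := outerA_spec in1 in1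
  obtain ⟨hkI, hvI⟩ := initB_spec in1
  have hnz : ∀ v ∈ in1, v ≠ 0 := fun v hv hz => h0 (hz ▸ hv)
  set dB := in1.foldl (fun c v =>
      let a := if v < 0 then -v else v
      creditLoop (a.toNat + 1) c a 1) (initB in1) with hdB
  have hkB : dB.keys = PySem.List.dedup in1 :=
    ((creditFold_spec in1 (initB in1) 0 hnz).1).trans hkI
  have hvB : ∀ x ∈ PySem.List.dedup in1, dB.getD x 0 =
      (in1.countP (fun v => decide (x ∣ v)) : Int) := by
    intro x hx
    have hxm : x ∈ in1 := (PySem.List.mem_dedup in1 x).1 hx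
    have hx0 : x ≠ 0 := fun hz => h0 (hz ▸ hxm)
    have hcx : (initB in1).contains x = true := by
      rw [PySem.Dict.contains_iff_mem_keys, hkI]; exact hx
    have := (creditFold_spec in1 (initB in1) x hnz).2
    rw [hdB, this, hvI x, if_pos ⟨hcx, hx0⟩]
    ring
  have hnodA : (outerA in1 in1).keys.Nodup := by rw [hkA]; exact PySem.List.nodup_dedup in1
  have hnodB : dB.keys.Nodup := by rw [hkB]; exact PySem.List.nodup_dedup in1
  rw [PySem.Dict.items_eq_map_keys _ hnodA 0, PySem.Dict.items_eq_map_keys _ hnodB 0, hkA, hkB]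
  apply List.map_congr_left
  intro x hx
  rw [hvA x hx, hvB x hx]
  have : in1.countP (fun y => PySem.Int.mod y x == 0) = in1.countP (fun v => decide (x ∣ v)) := by
    apply List.countP_congr
    intro y _
    by_cases h : x ∣ y
    · simp [h, (PySem.Int.mod_eq_zero_iff_dvd y x).2 h]
    · have : PySem.Int.mod y x ≠ 0 := fun hm => h ((PySem.Int.mod_eq_zero_iff_dvd y x).1 hm)
      simp [h, this]
  rw [this]

theorem Solution_spec : Claim_equal_Solution := by
  intro in1 _hdom hpre
  obtain ⟨hne, h0⟩ := hpre
  unfold Spec_Solution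
  have hA : Solution in1 = ((outerA in1 in1).items.foldl
      (fun (p : Option Int × Option Int) kv =>
        match p.1 with
        | none => (some kv.1, some kv.2)
        | some _ => if p.2.getD 0 < kv.2 then (some kv.1, some kv.2) else p)
      ((none : Option Int), (none : Option Int))).1.getD 0 := by
    unfold Solution
    have hinner : ∀ (x : Int) (dd : PySem.Dict Int Int),
        List.foldl (fun d j =>
          if PySem.Int.mod (PySem.List.pyGetD in1 j 0) x == 0 then d.modify x 0 (· + 1) else d)
          dd (PySem.List.pyRange 0 (PySem.List.len in1) 1) = innerA in1 x dd := fun x dd =>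
      PySem.List.foldl_pyRange_zero_pyGetD in1 0
        (fun d y => if PySem.Int.mod y x == 0 then d.modify x 0 (· + 1) else d) dd
    simp only [hinner]
    rw [PySem.List.foldl_pyRange_zero_pyGetD in1 0
      (fun d v => innerA in1 v (d.insert v 0)) PySem.Dict.empty]
    rfl
  have hB : Solution_alt in1 = ((in1.foldl (fun c v =>
        let a := if v < 0 then -v else v
        creditLoop (a.toNat + 1) c a 1) (initB in1)).items.foldl
      (fun (p : Option Int × Int) kv =>
        if kv.2 > p.2 then (some kv.1, kv.2) else p)
      ((none : Option Int), (-1 : Int))).1.getD 0 := rfl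
  rw [hA, hB, ← items_eq in1 h0]
  -- the common items list is nonempty and its first value is a count (≥ 0)
  obtain ⟨w, t, rfl⟩ : ∃ w t, in1 = w :: t := by
    cases in1 with
    | nil => exact absurd rfl hne
    | cons w t => exact ⟨w, t, rfl⟩
  obtain ⟨hkA, hvA⟩ := outerA_spec (w :: t) (w :: t)
  have hded : PySem.List.dedup (w :: t) = w :: PySem.Set.discard (PySem.Set.ofList t) w := by
    rw [PySem.List.dedup_eq_ofList, PySem.Set.ofList_cons]
  have hnodA : (outerA (w :: t) (w :: t)).keys.Nodup := by
    rw [hkA]; exact PySem.List.nodup_dedup _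
  have hitems : (outerA (w :: t) (w :: t)).items =
      (PySem.List.dedup (w :: t)).map
        (fun k => (k, (outerA (w :: t) (w :: t)).getD k 0)) := by
    rw [PySem.Dict.items_eq_map_keys _ hnodA 0, hkA]
  rw [hitems, hded, List.map_cons]
  have hw : (outerA (w :: t) (w :: t)).getD w 0 =
      ((w :: t).countP (fun y => PySem.Int.mod y w == 0) : Int) :=
    hvA w (by rw [hded]; exact List.mem_cons_self)
  rw [hw]
  exact scan_eq w _ _ (by positivity)
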